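-- pv_equiv track=rewrite | github.com/eliottcassidy2000/math | 04-computation/h21_impossibility.py | get_cycle_data
-- ===== SOURCE A (Python) =====
-- from itertools import combinations, permutations
--
-- def count_ham_cycles_sub(A_sub, m):
--     """Count directed Hamiltonian cycles in m-vertex sub-tournament."""
--     if m < 3:
--         return 0
--     dp = {}
--     dp[(1 << 0, 0)] = 1
--     for mask_size in range(2, m + 1):
--         for mask in range(1 << m):
--             if bin(mask).count('1') != mask_size:
--                 continue
--             if not (mask & 1):
--                 continue
--             for v in range(m):
--                 if v == 0 and mask_size < m:
--                     continue
--                 if not (mask & (1 << v)):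
--                     continue
--                 prev_mask = mask ^ (1 << v)
--                 total = 0
--                 for u in range(m):
--                     if (prev_mask & (1 << u)) and A_sub[u][v]:
--                         total += dp.get((prev_mask, u), 0)
--                 if total > 0:
--                     dp[(mask, v)] = dp.get((mask, v), 0) + total
--     full = (1 << m) - 1
--     count = 0
--     for u in range(1, m):
--         if A_sub[u][0]:
--             count += dp.get((full, u), 0)
--     return count
--
-- def get_cycle_data(A):
--     """Return (c3, c5, c7, a1, a2, list_of_3cycle_sets)."""
--     n = len(A)
--
--     # 3-cycles
--     cycles_3 = []
--     for verts in combinations(range(n), 3):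
--         i, j, k = verts
--         if A[i][j] and A[j][k] and A[k][i]:
--             cycles_3.append(frozenset(verts))
--         elif A[i][k] and A[k][j] and A[j][i]:
--             cycles_3.append(frozenset(verts))
--     c3 = len(cycles_3)
--
--     # 5-cycles
--     c5 = 0
--     for verts in combinations(range(n), 5):
--         sub = [[A[verts[i]][verts[j]] for j in range(5)] for i in range(5)]
--         c5 += count_ham_cycles_sub(sub, 5)
--
--     # 7-cycles (only if n=7)
--     c7 = 0
--     if n == 7:
--         c7 = count_ham_cycles_sub(A, 7)
--
--     a1 = c3 + c5 + c7
--
--     # a2: disjoint pairs of odd cycles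
--     # At n=7, only 3-cycle pairs can be disjoint
--     a2 = 0
--     for i in range(len(cycles_3)):
--         for j in range(i+1, len(cycles_3)):
--             if cycles_3[i].isdisjoint(cycles_3[j]):
--                 a2 += 1
--
--     return c3, c5, c7, a1, a2, cycles_3
-- ===== SOURCE B (Python) =====
-- from itertools import combinations, permutations
--
--
-- def count_ham_cycles_sub(A_sub, m):
--     """Count directed Hamiltonian cycles by enumerating them: fix vertex 0 as the
--     start and try every ordering of the remaining vertices."""
--     if m < 3:
--         return 0
--     count = 0
--     for perm in permutations(range(1, m)):
--         seq = [0] + list(perm)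
--         if all(A_sub[u][v] for u, v in zip(seq, seq[1:])) and A_sub[seq[-1]][0]:
--             count += 1
--     return count
--
--
-- def get_cycle_data(A):
--     """Return (c3, c5, c7, a1, a2, list_of_3cycle_sets)."""
--     n = len(A)
--     cycles_3 = [frozenset(t) for t in combinations(range(n), 3)
--                 if (A[t[0]][t[1]] and A[t[1]][t[2]] and A[t[2]][t[0]])
--                 or (A[t[0]][t[2]] and A[t[2]][t[1]] and A[t[1]][t[0]])]
--     c3 = len(cycles_3)
--     c5 = sum(count_ham_cycles_sub([[A[p][q] for q in t] for p in t], 5)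
--              for t in combinations(range(n), 5))
--     c7 = count_ham_cycles_sub(A, 7) if n == 7 else 0
--     a2 = sum(1 for s, t in combinations(cycles_3, 2) if not (s & t))
--     return c3, c5, c7, c3 + c5 + c7, a2, cycles_3
-- ===== Notes on version B (the rewrite author's own statement) =====
-- stated objective: alternative
-- what changed: The bitmask dynamic program for counting directed Hamiltonian cycles is replaced by direct enumeration: fix vertex 0 and test every permutation of the remaining vertices; the 3-cycle collection, 5-subset aggregation and disjoint-pair count are restructured as comprehensions.
-- outside the precondition, e.g. on get_cycle_data([[0, 0, 0], [9, 9], [0, 0, 0]]): A returns (0, 0, 0, 0, 0, []), B returns (0, 0, 0, 0, 0, [])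
import Mathlib
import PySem

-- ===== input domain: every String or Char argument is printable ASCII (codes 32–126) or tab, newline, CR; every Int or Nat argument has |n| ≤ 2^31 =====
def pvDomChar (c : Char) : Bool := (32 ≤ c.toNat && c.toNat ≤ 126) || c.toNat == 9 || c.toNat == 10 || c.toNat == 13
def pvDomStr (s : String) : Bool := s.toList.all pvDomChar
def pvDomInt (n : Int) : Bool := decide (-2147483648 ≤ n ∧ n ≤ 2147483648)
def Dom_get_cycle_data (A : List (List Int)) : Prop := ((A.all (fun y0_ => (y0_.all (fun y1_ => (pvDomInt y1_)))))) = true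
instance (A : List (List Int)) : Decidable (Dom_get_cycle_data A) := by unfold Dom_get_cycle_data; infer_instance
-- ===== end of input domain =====

-- B replaces the bitmask-DP Hamiltonian-cycle counter by direct enumeration of the
-- cycles (permutations of the non-0 vertices), and restructures the surrounding loops
-- as comprehensions; objective: alternative (similar cost at the fixed sizes used).

-- ===== PORT A =====

-- A[u][v] (always evaluated in range under Pre_; out of range Python raises, excluded by Pre_)
def pvEntry (A : List (List Int)) (u v : Nat) : Int := (A.getD u []).getD v 0

-- literal port of A's bitmask DP; bin(mask).count('1') is PySem.Int.bitCount (exact for mask ≥ 0)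
def count_ham_cycles_sub (Asub : List (List Int)) (m : Int) : Int :=
  if m < 3 then 0 else
  let mn := m.toNat
  let dp0 : PySem.Dict (Nat × Nat) Int := PySem.Dict.empty.insert (1, 0) 1
  let dp := (List.range' 2 (mn - 1)).foldl (fun dp ms =>
    (List.range (2 ^ mn)).foldl (fun dp (mask : Nat) =>
      if PySem.Int.bitCount (mask : Int) ≠ ms then dp
      else if ¬ mask.testBit 0 then dp
      else (List.range mn).foldl (fun dp v =>
        if v = 0 ∧ ms < mn then dp
        else if ¬ mask.testBit v then dp
        else
          let prev := mask ^^^ (1 <<< v)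
          let total : Int := (List.range mn).foldl (fun t u =>
            if prev.testBit u ∧ pvEntry Asub u v ≠ 0 then t + dp.getD (prev, u) 0 else t) 0
          if total > 0 then dp.insert (mask, v) (dp.getD (mask, v) 0 + total) else dp) dp) dp) dp0
  let full := 2 ^ mn - 1
  (List.range' 1 (mn - 1)).foldl (fun c u =>
    if pvEntry Asub u 0 ≠ 0 then c + dp.getD (full, u) 0 else c) 0

def get_cycle_data (A : List (List Int)) : Int × Int × Int × Int × Int × List (List Int) :=
  let n := A.length
  let cycles3 : List (List Int) := (PySem.List.combinations (List.range n) 3).foldl (fun acc t =>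
    let i := t.getD 0 0; let j := t.getD 1 0; let k := t.getD 2 0
    if pvEntry A i j ≠ 0 ∧ pvEntry A j k ≠ 0 ∧ pvEntry A k i ≠ 0 then
      acc ++ [PySem.Set.ofList (t.map (fun x => (x : Int)))]
    else if pvEntry A i k ≠ 0 ∧ pvEntry A k j ≠ 0 ∧ pvEntry A j i ≠ 0 then
      acc ++ [PySem.Set.ofList (t.map (fun x => (x : Int)))]
    else acc) []
  let c3 : Int := cycles3.length
  let c5 : Int := (PySem.List.combinations (List.range n) 5).foldl (fun c t =>
    let sub := (List.range 5).map (fun i => (List.range 5).map (fun j => pvEntry A (t.getD i 0) (t.getD j 0)))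
    c + count_ham_cycles_sub sub 5) 0
  let c7 : Int := if n = 7 then count_ham_cycles_sub A 7 else 0
  let a1 := c3 + c5 + c7
  let a2 : Int := (List.range cycles3.length).foldl (fun a i =>
    (List.range' (i + 1) (cycles3.length - (i + 1))).foldl (fun a j =>
      if PySem.Set.isdisjoint (cycles3.getD i []) (cycles3.getD j []) then a + 1 else a) a) 0
  (c3, c5, c7, a1, a2, cycles3)

-- ===== PORT B =====

-- B counts Hamiltonian cycles by enumerating orderings of the vertices other than 0
def pvCountHamAlt (Asub : List (List Int)) (m : Int) : Int :=
  if m < 3 then 0 else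
  let mn := m.toNat
  let verts := List.range' 1 (mn - 1)
  (PySem.List.permutations verts verts.length).foldl (fun c p =>
    let seq := 0 :: p
    if ((seq.zip seq.tail).all (fun uv => pvEntry Asub uv.1 uv.2 != 0)) &&
       (pvEntry Asub (seq.getLastD 0) 0 != 0) then c + 1 else c) 0

def get_cycle_data_alt (A : List (List Int)) : Int × Int × Int × Int × Int × List (List Int) :=
  let n := A.length
  let cycles3 : List (List Int) := ((PySem.List.combinations (List.range n) 3).filter (fun t =>
    let i := t.getD 0 0; let j := t.getD 1 0; let k := t.getD 2 0
    ((pvEntry A i j != 0) && (pvEntry A j k != 0) && (pvEntry A k i != 0)) ||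
    ((pvEntry A i k != 0) && (pvEntry A k j != 0) && (pvEntry A j i != 0)))).map
      (fun t => PySem.Set.ofList (t.map (fun x => (x : Int))))
  let c3 : Int := cycles3.length
  let c5 : Int := ((PySem.List.combinations (List.range n) 5).map (fun t =>
    pvCountHamAlt (t.map (fun p => t.map (fun q => pvEntry A p q))) 5)).sum
  let c7 : Int := if n = 7 then pvCountHamAlt A 7 else 0
  let a2 : Int := ((PySem.List.combinations cycles3 2).countP (fun pr =>
    PySem.Set.inter (pr.getD 0 []) (pr.getD 1 []) == ([] : List Int)) : Int)
  (c3, c5, c7, c3 + c5 + c7, a2, cycles3)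

-- ===== PRECONDITION & SPEC =====
-- Pre_ excludes ragged matrices (a row shorter than len(A)) once len(A) ≥ 3: there A's
-- A[i][j] indexing usually raises IndexError; on the few such inputs where lazy `and`
-- evaluation lets A return, B returns the same value.
def Pre_get_cycle_data (A : List (List Int)) : Prop :=
  A.length < 3 ∨ ∀ row ∈ A, A.length ≤ row.length
instance (A : List (List Int)) : Decidable (Pre_get_cycle_data A) := by
  unfold Pre_get_cycle_data; infer_instance

def pvWitness_get_cycle_data : List (List Int) :=
  [[0, 1, 0], [0, 0, 1], [1, 0, 0]]

def Spec_get_cycle_data (A : List (List Int)) (out : Int × Int × Int × Int × Int × List (List Int)) : Prop := out = get_cycle_data_alt A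
instance (A : List (List Int)) (out : Int × Int × Int × Int × Int × List (List Int)) : Decidable (Spec_get_cycle_data A out) := by unfold Spec_get_cycle_data; infer_instance

-- ===== CLAIM (what is proved, stated in full; the proofs are below) =====
def Claim_equal_get_cycle_data : Prop := ∀ (A : List (List Int)), Dom_get_cycle_data A → Pre_get_cycle_data A → Spec_get_cycle_data A (get_cycle_data A)

-- ===== LEMMAS AND PROOFS =====

-- ---------- bit/popcount helpers ----------

-- popcount as used by the DP port (bin(mask).count('1'))
def pvc (n : Nat) : Nat := PySem.Int.bitCount (n : Int)

theorem pvc_rec (n : Nat) (h : 0 < n) : pvc n = n % 2 + pvc (n / 2) := by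
  simpa [pvc] using PySem.Int.bitCount_natCast h

theorem pvc_bit (k b : Nat) (hb : b < 2) : pvc (2 * k + b) = b + pvc k := by
  rcases Nat.eq_zero_or_pos k with hk | hk
  · subst hk; interval_cases b <;> decide
  · rw [pvc_rec (2 * k + b) (by omega)]
    have h1 : (2 * k + b) % 2 = b := by omega
    have h2 : (2 * k + b) / 2 = k := by omega
    rw [h1, h2]

theorem pvc_zero : pvc 0 = 0 := by decide

theorem pvc_eq_zero : ∀ n : Nat, pvc n = 0 ↔ n = 0 := by
  intro n
  induction n using Nat.strong_induction_on with
  | _ n ih =>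
    rcases Nat.eq_zero_or_pos n with h | h
    · subst h; simp [pvc_zero]
    · rw [pvc_rec n h]
      constructor
      · intro he
        have h2 : pvc (n / 2) = 0 := by omega
        have := (ih (n / 2) (Nat.div_lt_self h one_lt_two)).mp h2
        omega
      · omega

theorem pvXorMod2 (a b : Nat) : (a ^^^ b) % 2 = (a % 2 + b % 2) % 2 := by
  have h : (a ^^^ b) % 2 = (a + b) % 2 := by simp
  omega

theorem pvXorDiv (mask v : Nat) : (mask ^^^ 2 ^ (v + 1)) / 2 = mask / 2 ^^^ 2 ^ v := by
  rw [Nat.xor_div_two]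
  congr 1
  rw [pow_succ]
  omega

theorem pvXorSplit (mask v : Nat) :
    mask ^^^ 2 ^ (v + 1) = 2 * (mask / 2 ^^^ 2 ^ v) + mask % 2 := by
  have hd := pvXorDiv mask v
  have hm := pvXorMod2 mask (2 ^ (v + 1))
  have h2 : 2 ^ (v + 1) % 2 = 0 := by
    rw [pow_succ]; omega
  have := Nat.div_add_mod (mask ^^^ 2 ^ (v + 1)) 2
  omega

theorem pvXorOne (mask : Nat) (h : mask % 2 = 1) : mask ^^^ 1 = 2 * (mask / 2) := by
  have hd : (mask ^^^ 1) / 2 = mask / 2 := by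
    rw [Nat.xor_div_two]
    simp
  have hm := pvXorMod2 mask 1
  have := Nat.div_add_mod (mask ^^^ 1) 2
  omega

theorem pvXorLt {mask : Nat} : ∀ v, mask.testBit v = true → mask ^^^ 2 ^ v < mask := by
  induction mask using Nat.strong_induction_on with
  | _ mask ih =>
    intro v h
    cases v with
    | zero =>
      have hm : mask % 2 = 1 := by simpa [Nat.testBit_zero] using h
      rw [pow_zero, pvXorOne mask hm]
      omega
    | succ v =>
      have hb : (mask / 2).testBit v = true := by
        rw [← Nat.testBit_add_one]; exact h
      have hpos : 0 < mask := by
        rcases Nat.eq_zero_or_pos mask with h0 | h0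
        · subst h0; simp at h
        · exact h0
      have hlt : mask / 2 ^^^ 2 ^ v < mask / 2 :=
        ih (mask / 2) (Nat.div_lt_self hpos one_lt_two) v hb
      have := pvXorSplit mask v
      omega

theorem pvc_xor {mask : Nat} : ∀ v, mask.testBit v = true →
    pvc (mask ^^^ 2 ^ v) + 1 = pvc mask := by
  induction mask using Nat.strong_induction_on with
  | _ mask ih =>
    intro v h
    cases v with
    | zero =>
      have hm : mask % 2 = 1 := by simpa [Nat.testBit_zero] using h
      rw [pow_zero, pvXorOne mask hm]
      have h1 : pvc (2 * (mask / 2)) = 0 + pvc (mask / 2) := pvc_bit _ 0 (by omega)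
      have h2 : pvc mask = 1 + pvc (mask / 2) := by
        have := pvc_bit (mask / 2) 1 (by omega)
        have hd := Nat.div_add_mod mask 2
        rw [show 2 * (mask / 2) + 1 = mask by omega] at this
        exact this
      omega
    | succ v =>
      have hb : (mask / 2).testBit v = true := by
        rw [← Nat.testBit_add_one]; exact h
      have hpos : 0 < mask := by
        rcases Nat.eq_zero_or_pos mask with h0 | h0
        · subst h0; simp at h
        · exact h0
      have hih := ih (mask / 2) (Nat.div_lt_self hpos one_lt_two) v hb
      rw [pvXorSplit mask v, pvc_bit _ _ (Nat.mod_lt mask (by omega))]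
      have h2 : pvc mask = mask % 2 + pvc (mask / 2) := pvc_rec mask hpos
      omega

theorem pvc_one_of (mask : Nat) (h0 : mask.testBit 0 = true) (h1 : pvc mask ≤ 1) : mask = 1 := by
  have hm : mask % 2 = 1 := by simpa [Nat.testBit_zero] using h0
  have hpos : 0 < mask := by omega
  have h2 := pvc_rec mask hpos
  have h3 : pvc (mask / 2) = 0 := by omega
  have := (pvc_eq_zero (mask / 2)).mp h3
  omega

theorem pvc_full (n : Nat) : pvc (2 ^ n - 1) = n := by
  induction n with
  | zero => decide
  | succ n ih =>
    have h1 : (1 : Nat) ≤ 2 ^ n := Nat.one_le_two_pow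
    have h2 : 2 ^ (n + 1) - 1 = 2 * (2 ^ n - 1) + 1 := by
      rw [pow_succ]; omega
    rw [h2, pvc_bit _ 1 (by omega), ih]
    omega

theorem pvBitLt {mn mask x : Nat} (hm : mask < 2 ^ mn) (h : mask.testBit x = true) : x < mn := by
  by_contra hx
  have hle : 2 ^ mn ≤ 2 ^ x := Nat.pow_le_pow_right (by omega) (by omega)
  have : mask.testBit x = false := Nat.testBit_lt_two_pow (by omega)
  simp [this] at h

-- ---------- paths: the combinatorial object both counts describe ----------

-- all adjacency-paths 0 → v visiting exactly the vertices of `mask` (fuel-indexed)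
def pvPaths (Asub : List (List Int)) (mn : Nat) : Nat → Nat → Nat → List (List Nat)
  | 0, _, _ => []
  | f + 1, mask, v =>
    if mask.testBit v then
      if v = 0 then (if mask = 1 then [[0]] else [])
      else (List.range mn).flatMap (fun u =>
        if (mask ^^^ 2 ^ v).testBit u ∧ pvEntry Asub u v ≠ 0 then
          (pvPaths Asub mn f (mask ^^^ 2 ^ v) u).map (· ++ [v]) else [])
    else []

def pvP (Asub : List (List Int)) (mn mask v : Nat) : List (List Nat) :=
  pvPaths Asub mn (mask + 1) mask v

theorem pvPaths_fuel (Asub : List (List Int)) (mn : Nat) :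
    ∀ mask f g v, mask < f → mask < g →
      pvPaths Asub mn f mask v = pvPaths Asub mn g mask v := by
  intro mask
  induction mask using Nat.strong_induction_on with
  | _ mask ih =>
    intro f g v hf hg
    cases f with
    | zero => omega
    | succ f =>
      cases g with
      | zero => omega
      | succ g =>
        simp only [pvPaths]
        by_cases hb : mask.testBit v = true
        · by_cases hv : v = 0
          · simp [hv]
          · simp only [hb, hv, if_true, if_false]
            have hlt := pvXorLt v hb
            congr 1
            funext u
            rw [ih (mask ^^^ 2 ^ v) hlt f g u (by omega) (by omega)]
        · simp [hb]

def pvGood (Asub : List (List Int)) (q : List Nat) (mask v : Nat) : Prop :=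
  q.head? = some 0 ∧ q.getLast? = some v ∧ q.Nodup ∧
    (∀ x, x ∈ q ↔ mask.testBit x = true) ∧
    List.IsChain (fun a b => pvEntry Asub a b ≠ 0) q

theorem pvTestBitXor (mask v x : Nat) :
    (mask ^^^ 2 ^ v).testBit x = ((mask.testBit x) != (decide (v = x))) := by
  rw [Nat.testBit_xor, Nat.testBit_two_pow]

theorem pvGood_single (Asub : List (List Int)) {q : List Nat} {mask : Nat}
    (hg : pvGood Asub q mask 0) : q = [0] ∧ mask = 1 := by
  obtain ⟨h1, h2, h3, h4, h5⟩ := hg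
  obtain ⟨t, rfl⟩ : ∃ t, q = 0 :: t := by
    cases q with
    | nil => simp at h1
    | cons a t => simp at h1; exact ⟨t, by rw [h1]⟩
  have ht : t = [] := by
    cases t with
    | nil => rfl
    | cons b t' =>
      have hlast : (0 :: b :: t').getLast? = (b :: t').getLast? := by
        rw [List.getLast?_cons_cons]
      rw [hlast] at h2
      have hb0 : (0 : Nat) ∈ b :: t' := by
        have := List.mem_of_getLast? (l := b :: t') (a := 0) h2
        exact this
      simp at h3
      rcases List.mem_cons.mp hb0 with h | h
      · exact absurd h h3.1.1
      · exact absurd h h3.1.2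
  subst ht
  refine ⟨rfl, ?_⟩
  apply Nat.eq_of_testBit_eq
  intro i
  have := h4 i
  simp at this
  rw [show (1 : Nat) = 2 ^ 0 by norm_num, Nat.testBit_two_pow]
  by_cases hi : i = 0
  · subst hi
    simp [this.mp rfl]
  · have hx : mask.testBit i = false := by
      have := mt this.mpr hi
      simpa using this
    simp [hx, Ne.symm hi]

theorem pvPaths_mem (Asub : List (List Int)) (mn : Nat) :
    ∀ mask f v q, mask < f → mask < 2 ^ mn →
      (q ∈ pvPaths Asub mn f mask v ↔ pvGood Asub q mask v) := by
  intro mask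
  induction mask using Nat.strong_induction_on with
  | _ mask ih =>
    intro f v q hf hmn
    cases f with
    | zero => omega
    | succ f =>
      simp only [pvPaths]
      by_cases hb : mask.testBit v = true
      · by_cases hv : v = 0
        · subst hv
          simp only [hb, if_true]
          by_cases hm1 : mask = 1
          · subst hm1
            simp only [if_true]
            constructor
            · intro hq
              simp at hq
              subst hq
              refine ⟨rfl, rfl, by simp, ?_, by simp⟩
              intro x
              rw [show (1 : Nat) = 2 ^ 0 by norm_num, Nat.testBit_two_pow]
              simp [eq_comm]
            · intro hg
              simp [(pvGood_single Asub hg).1]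
          · simp only [hm1, if_false]
            constructor
            · intro hq; simp at hq
            · intro hg
              exact absurd (pvGood_single Asub hg).2 hm1
        · simp only [hb, hv, if_true, if_false]
          have hvmn : v < mn := pvBitLt hmn hb
          have hprevlt : mask ^^^ 2 ^ v < mask := pvXorLt v hb
          have hprev2 : mask ^^^ 2 ^ v < 2 ^ mn :=
            Nat.xor_lt_two_pow hmn (Nat.pow_lt_pow_right one_lt_two hvmn)
          have hprevbit : ∀ x, (mask ^^^ 2 ^ v).testBit x = (if v = x then false else mask.testBit x) := by
            intro x
            rw [pvTestBitXor]
            by_cases hx : v = x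
            · subst hx
              simp [hb]
            · simp [hx]
          constructor
          · intro hq
            rw [List.mem_flatMap] at hq
            obtain ⟨u, hu, hq⟩ := hq
            rw [List.mem_range] at hu
            by_cases hcnd : (mask ^^^ 2 ^ v).testBit u = true ∧ pvEntry Asub u v ≠ 0
            swap
            · rw [if_neg hcnd] at hq
              simp at hq
            rw [if_pos hcnd] at hq
            obtain ⟨hub, hadj⟩ := hcnd
            rw [List.mem_map] at hq
            obtain ⟨q', hq', rfl⟩ := hq
            rw [ih (mask ^^^ 2 ^ v) hprevlt f u q' (by omega) hprev2] at hq'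
            obtain ⟨g1, g2, g3, g4, g5⟩ := hq'
            have hq'ne : q' ≠ [] := by
              intro h0; rw [h0] at g1; simp at g1
            refine ⟨?_, List.getLast?_concat, ?_, ?_, ?_⟩
            · rw [List.head?_append, g1]; rfl
            · rw [List.nodup_append]
              refine ⟨g3, by simp, ?_⟩
              have hvnotin : v ∉ q' := by
                intro hvq
                have := (g4 v).mp hvq
                rw [hprevbit v] at this
                simp at this
              intro a ha b hb' hab
              simp at hb'
              exact hvnotin (by rw [← hb', ← hab]; exact ha)
            · intro x
              simp only [List.mem_append, List.mem_singleton]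
              rw [g4 x, hprevbit x]
              by_cases hx : v = x
              · subst hx
                simp [hb]
              · simp [hx, Ne.symm hx]
            · rw [List.isChain_append]
              refine ⟨g5, by simp, ?_⟩
              intro x hx y hy
              rw [g2] at hx
              simp at hx hy
              subst hx
              subst hy
              exact hadj
          · intro hg
            obtain ⟨g1, g2, g3, g4, g5⟩ := hg
            obtain ⟨q', rfl⟩ := List.getLast?_eq_some_iff.mp g2
            have hq'ne : q' ≠ [] := by
              intro h0
              subst h0
              simp at g1
              exact hv g1
            obtain ⟨u, hu⟩ : ∃ u, q'.getLast? = some u := by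
              cases hq'' : q'.getLast? with
              | none => rw [List.getLast?_eq_none_iff] at hq''; exact absurd hq'' hq'ne
              | some u => exact ⟨u, rfl⟩
            have humem : u ∈ q' := List.mem_of_getLast? hu
            have huq : u ∈ q' ++ [v] := by simp [humem]
            have hubit : mask.testBit u = true := (g4 u).mp huq
            have humn : u < mn := pvBitLt hmn hubit
            have hunv : u ≠ v := by
              rw [List.nodup_append] at g3
              exact g3.2.2 u humem v (by simp)
            have hadj : pvEntry Asub u v ≠ 0 := by
              rw [List.isChain_append] at g5
              exact g5.2.2 u (by simp [hu]) v (by simp)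
            have hprevu : (mask ^^^ 2 ^ v).testBit u = true := by
              rw [hprevbit u, if_neg (Ne.symm hunv)]
              exact hubit
            rw [List.mem_flatMap]
            refine ⟨u, by rw [List.mem_range]; exact humn, ?_⟩
            rw [if_pos ⟨hprevu, hadj⟩, List.mem_map]
            refine ⟨q', ?_, rfl⟩
            rw [ih (mask ^^^ 2 ^ v) hprevlt f u q' (by omega) hprev2]
            rw [List.nodup_append] at g3
            rw [List.isChain_append] at g5
            refine ⟨?_, hu, g3.1, ?_, g5.1⟩
            · rw [List.head?_append] at g1
              cases hh : q'.head? with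
              | none => rw [List.head?_eq_none_iff] at hh; exact absurd hh hq'ne
              | some a => rw [hh] at g1; simpa [hh] using g1
            · intro x
              rw [hprevbit x]
              constructor
              · intro hxq
                have hxv : x ≠ v := fun hxv => g3.2.2 x hxq v (by simp) hxv
                rw [if_neg (Ne.symm hxv)]
                exact (g4 x).mp (by simp [hxq])
              · intro hxb
                by_cases hxv : v = x
                · rw [if_pos hxv] at hxb; simp at hxb
                · rw [if_neg hxv] at hxb
                  have := (g4 x).mpr hxb
                  simp at this
                  rcases this with h | h
                  · exact h
                  · exact absurd h.symm hxv
      · simp only [hb]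
        constructor
        · intro hq; simp at hq
        · intro hg
          obtain ⟨g1, g2, g3, g4, g5⟩ := hg
          have : v ∈ q := List.mem_of_getLast? g2
          have := (g4 v).mp this
          rw [this] at hb
          simp at hb

theorem pvPaths_nodup (Asub : List (List Int)) (mn : Nat) :
    ∀ mask f v, mask < f → mask < 2 ^ mn → (pvPaths Asub mn f mask v).Nodup := by
  intro mask
  induction mask using Nat.strong_induction_on with
  | _ mask ih =>
    intro f v hf hmn
    cases f with
    | zero => omega
    | succ f =>
      simp only [pvPaths]
      by_cases hb : mask.testBit v = true
      · by_cases hv : v = 0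
        · subst hv
          simp only [hb, if_true]
          split <;> simp
        · simp only [hb, hv, if_true, if_false]
          have hprevlt : mask ^^^ 2 ^ v < mask := pvXorLt v hb
          have hvmn : v < mn := pvBitLt hmn hb
          have hprev2 : mask ^^^ 2 ^ v < 2 ^ mn :=
            Nat.xor_lt_two_pow hmn (Nat.pow_lt_pow_right one_lt_two hvmn)
          rw [List.nodup_flatMap]
          constructor
          · intro u _
            by_cases hc : (mask ^^^ 2 ^ v).testBit u = true ∧ pvEntry Asub u v ≠ 0
            · rw [if_pos hc]
              exact List.Nodup.map
                (fun a b hab => List.append_cancel_right hab)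
                (ih (mask ^^^ 2 ^ v) hprevlt f u (by omega) hprev2)
            · rw [if_neg hc]
              simp
          · apply List.Pairwise.imp ?_ (List.nodup_range)
            intro u₁ u₂ hne q hq₁ hq₂
            simp only at hq₁ hq₂
            by_cases hc₁ : (mask ^^^ 2 ^ v).testBit u₁ = true ∧ pvEntry Asub u₁ v ≠ 0
            swap
            · rw [if_neg hc₁] at hq₁; simp at hq₁
            by_cases hc₂ : (mask ^^^ 2 ^ v).testBit u₂ = true ∧ pvEntry Asub u₂ v ≠ 0
            swap
            · rw [if_neg hc₂] at hq₂; simp at hq₂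
            rw [if_pos hc₁] at hq₁
            rw [if_pos hc₂] at hq₂
            rw [List.mem_map] at hq₁ hq₂
            obtain ⟨q₁, hq₁m, hq₁e⟩ := hq₁
            obtain ⟨q₂, hq₂m, hq₂e⟩ := hq₂
            have hqq : q₁ = q₂ := List.append_cancel_right (hq₁e.trans hq₂e.symm)
            subst hqq
            rw [pvPaths_mem Asub mn (mask ^^^ 2 ^ v) f u₁ q₁ (by omega) hprev2] at hq₁m
            rw [pvPaths_mem Asub mn (mask ^^^ 2 ^ v) f u₂ q₁ (by omega) hprev2] at hq₂m
            have e₁ := hq₁m.2.1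
            have e₂ := hq₂m.2.1
            rw [e₁] at e₂
            simp at e₂
            exact hne e₂
      · simp [hb]

theorem pvP_zero_len (Asub : List (List Int)) (mn prev : Nat) (h : prev ≠ 1) :
    pvP Asub mn prev 0 = [] := by
  simp only [pvP, pvPaths, h]
  split <;> simp

-- ---------- fold shapes ----------

theorem pvFoldFlatLen (l : List Nat) (c : Nat → Prop) [DecidablePred c]
    (g : Nat → List (List Nat)) (h : List Nat → List Nat) :
    ∀ init : Int, l.foldl (fun t u => if c u then t + ((g u).length : Int) else t) init
      = init + ((l.flatMap (fun u => if c u then (g u).map h else [])).length : Int) := by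
  induction l with
  | nil => intro init; simp
  | cons u l ihl =>
    intro init
    simp only [List.foldl_cons, List.flatMap_cons, List.length_append]
    rw [ihl]
    by_cases hc : c u
    · simp only [hc, if_true, List.length_map]
      push_cast
      ring
    · simp only [hc, if_false, List.length_nil]
      push_cast
      ring

-- ---------- the DP, restated with named pieces (definitionally the port's loops) ----------

def pvTotal (Asub : List (List Int)) (mn v prev : Nat) (dp : PySem.Dict (Nat × Nat) Int) : Int :=
  (List.range mn).foldl (fun t u =>
    if prev.testBit u ∧ pvEntry Asub u v ≠ 0 then t + dp.getD (prev, u) 0 else t) 0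

def pvVStep (Asub : List (List Int)) (mn ms mask : Nat)
    (dp : PySem.Dict (Nat × Nat) Int) (v : Nat) : PySem.Dict (Nat × Nat) Int :=
  if v = 0 ∧ ms < mn then dp
  else if ¬ mask.testBit v then dp
  else
    let prev := mask ^^^ (1 <<< v)
    let total : Int := pvTotal Asub mn v prev dp
    if total > 0 then dp.insert (mask, v) (dp.getD (mask, v) 0 + total) else dp

def pvMStep (Asub : List (List Int)) (mn ms : Nat)
    (dp : PySem.Dict (Nat × Nat) Int) (mask : Nat) : PySem.Dict (Nat × Nat) Int :=
  if PySem.Int.bitCount (mask : Int) ≠ ms then dp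
  else if ¬ mask.testBit 0 then dp
  else (List.range mn).foldl (pvVStep Asub mn ms mask) dp

def pvDP (Asub : List (List Int)) (mn : Nat) : PySem.Dict (Nat × Nat) Int :=
  (List.range' 2 (mn - 1)).foldl
    (fun dp ms => (List.range (2 ^ mn)).foldl (pvMStep Asub mn ms) dp)
    (PySem.Dict.empty.insert (1, 0) 1)

theorem count_ham_eq_pvDP (Asub : List (List Int)) (m : Int) :
    count_ham_cycles_sub Asub m
      = if m < 3 then 0 else
          (List.range' 1 (m.toNat - 1)).foldl (fun c u =>
            if pvEntry Asub u 0 ≠ 0 then c + (pvDP Asub m.toNat).getD (2 ^ m.toNat - 1, u) 0 else c) 0 := by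
  rfl

-- ---------- the DP invariant ----------

def pvCond (mn s M mask v : Nat) : Prop :=
  mask < 2 ^ mn ∧ v < mn ∧ mask.testBit 0 = true ∧ mask.testBit v = true ∧
    (v ≠ 0 ∨ mask = 1) ∧ (pvc mask < s ∨ (pvc mask = s ∧ mask < M))

def pvCondV (mn s M V mask v : Nat) : Prop :=
  pvCond mn s M mask v ∨ (mask = M ∧ v < V ∧ v < mn ∧ M.testBit v = true ∧ v ≠ 0)

def pvInvV (Asub : List (List Int)) (mn s M V : Nat) (dp : PySem.Dict (Nat × Nat) Int) : Prop :=
  ∀ mask v, (pvCondV mn s M V mask v → dp.getD (mask, v) 0 = ((pvP Asub mn mask v).length : Int))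
    ∧ (¬ pvCondV mn s M V mask v → dp.getD (mask, v) 0 = 0)

def pvInv (Asub : List (List Int)) (mn s M : Nat) (dp : PySem.Dict (Nat × Nat) Int) : Prop :=
  ∀ mask v, (pvCond mn s M mask v → dp.getD (mask, v) 0 = ((pvP Asub mn mask v).length : Int))
    ∧ (¬ pvCond mn s M mask v → dp.getD (mask, v) 0 = 0)

theorem pvP_one_zero (Asub : List (List Int)) (mn : Nat) : pvP Asub mn 1 0 = [[0]] := by
  simp [pvP, pvPaths]

theorem pvCond_base {mn : Nat} (h3 : 3 ≤ mn) : pvCond mn 2 0 1 0 := by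
  refine ⟨Nat.one_lt_two_pow (by omega), by omega, by decide, by decide, Or.inr rfl, Or.inl ?_⟩
  have : pvc 1 = 1 := by decide
  omega

theorem pvCond_base_eq {mn mask v : Nat} (hc : pvCond mn 2 0 mask v) :
    (mask, v) = ((1, 0) : Nat × Nat) := by
  obtain ⟨h1, h2, h3', h4, h5, h6⟩ := hc
  have hm1 : mask = 1 := by
    apply pvc_one_of mask h3'
    omega
  subst hm1
  have hv0 : v = 0 := by
    rw [show (1 : Nat) = 2 ^ 0 by norm_num, Nat.testBit_two_pow] at h4
    simp at h4
    omega
  simp [hv0]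

theorem pvInv_init (Asub : List (List Int)) (mn : Nat) (h3 : 3 ≤ mn) :
    pvInv Asub mn 2 0 (PySem.Dict.empty.insert (1, 0) 1) := by
  intro mask v
  by_cases he : (mask, v) = ((1, 0) : Nat × Nat)
  · rw [Prod.mk.injEq] at he
    obtain ⟨hm, hv⟩ := he
    subst hm; subst hv
    constructor
    · intro _
      rw [PySem.Dict.getD_insert_self, pvP_one_zero]
      simp
    · intro hc
      exact absurd (pvCond_base h3) hc
  · constructor
    · intro hc
      exact absurd (pvCond_base_eq hc) he
    · intro _
      rw [PySem.Dict.getD_insert_of_ne _ _ _ he, PySem.Dict.getD_empty]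

theorem pvCondV_succ_elim {mn s M V mask v : Nat}
    (h : ¬(mask = M ∧ v = V ∧ V < mn ∧ M.testBit V = true ∧ V ≠ 0)) :
    (pvCondV mn s M (V + 1) mask v ↔ pvCondV mn s M V mask v) := by
  unfold pvCondV
  constructor
  · rintro (hc | ⟨e1, e2, e3, e4, e5⟩)
    · exact Or.inl hc
    · by_cases hvV : v = V
      · subst hvV
        exact absurd ⟨e1, rfl, e3, e4, e5⟩ h
      · exact Or.inr ⟨e1, by omega, e3, e4, e5⟩
  · rintro (hc | ⟨e1, e2, e3, e4, e5⟩)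
    · exact Or.inl hc
    · exact Or.inr ⟨e1, by omega, e3, e4, e5⟩

theorem pvInvV_congr {Asub : List (List Int)} {mn s M V V' : Nat}
    {dp : PySem.Dict (Nat × Nat) Int}
    (h : ∀ mask v, pvCondV mn s M V' mask v ↔ pvCondV mn s M V mask v)
    (hinv : pvInvV Asub mn s M V dp) : pvInvV Asub mn s M V' dp := by
  intro mask v
  refine ⟨fun hc => (hinv mask v).1 ((h mask v).mp hc), fun hc => (hinv mask v).2 (fun hc' => hc ((h mask v).mpr hc'))⟩

theorem pvTotal_zero (Asub : List (List Int)) (mn : Nat) (v prev : Nat)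
    (dp : PySem.Dict (Nat × Nat) Int)
    (h : ∀ u, u < mn → dp.getD (prev, u) 0 = 0) :
    pvTotal Asub mn v prev dp = 0 := by
  unfold pvTotal
  rw [PySem.List.foldl_congr_mem' (g := fun t _ => t)]
  · exact PySem.List.foldl_ignore _ _
  · intro u hu t
    rw [List.mem_range] at hu
    by_cases hc : prev.testBit u = true ∧ pvEntry Asub u v ≠ 0
    · rw [if_pos hc, h u hu]
      ring
    · rw [if_neg hc]

theorem pvVStep_preserve (Asub : List (List Int)) (mn s M V : Nat)
    (h2 : 2 ≤ s) (hs : s ≤ mn) (hpc : pvc M = s) (hb0 : M.testBit 0 = true) (hM : M < 2 ^ mn)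
    (hV : V < mn) (dp : PySem.Dict (Nat × Nat) Int) (hinv : pvInvV Asub mn s M V dp) :
    pvInvV Asub mn s M (V + 1) (pvVStep Asub mn s M dp V) := by
  unfold pvVStep
  by_cases hg : V = 0 ∧ s < mn
  · rw [if_pos hg]
    refine pvInvV_congr (fun mask v => pvCondV_succ_elim ?_) hinv
    rintro ⟨-, -, -, -, hVne⟩
    exact hVne hg.1
  rw [if_neg hg]
  by_cases htb : M.testBit V = true
  swap
  · rw [if_pos htb]
    refine pvInvV_congr (fun mask v => pvCondV_succ_elim ?_) hinv
    rintro ⟨-, -, -, hVbit, -⟩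
    exact htb hVbit
  rw [if_neg (by simp [htb])]
  simp only [Nat.one_shiftLeft]
  by_cases hV0 : V = 0
  · -- v = 0 and s = mn: the previous mask lacks bit 0, every read is 0, no write happens
    subst hV0
    have hprev0 : (M ^^^ 2 ^ 0).testBit 0 = false := by
      rw [pvTestBitXor]
      simp [hb0]
    have hz : ∀ u, u < mn → dp.getD (M ^^^ 2 ^ 0, u) 0 = 0 := by
      intro u hu
      apply (hinv _ u).2
      rintro (⟨c1, c2, c3, c4, c5, c6⟩ | ⟨e1, e2, e3, e4, e5⟩)
      · rw [hprev0] at c3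
        exact Bool.false_ne_true c3
      · have : (M ^^^ 2 ^ 0).testBit 0 = M.testBit 0 := by rw [e1]
        rw [hprev0, hb0] at this
        exact Bool.false_ne_true this
    rw [pvTotal_zero Asub mn 0 _ dp hz]
    rw [if_neg (by omega)]
    refine pvInvV_congr (fun mask v => pvCondV_succ_elim ?_) hinv
    rintro ⟨-, -, -, -, hVne⟩
    exact hVne rfl
  · -- the real write: total is exactly the number of paths ending at V through M
    have hprevlt : M ^^^ 2 ^ V < M := pvXorLt V htb
    have hprev2 : M ^^^ 2 ^ V < 2 ^ mn :=
      Nat.xor_lt_two_pow hM (Nat.pow_lt_pow_right one_lt_two hV)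
    have hprev0 : (M ^^^ 2 ^ V).testBit 0 = true := by
      rw [pvTestBitXor]
      simp [hb0, hV0]
    have hprevne : M ^^^ 2 ^ V ≠ M := by omega
    have hpcprev : pvc (M ^^^ 2 ^ V) + 1 = s := by rw [pvc_xor V htb, hpc]
    have htot : pvTotal Asub mn V (M ^^^ 2 ^ V) dp = ((pvP Asub mn M V).length : Int) := by
      unfold pvTotal
      rw [PySem.List.foldl_congr_mem'
        (g := fun t u => if (M ^^^ 2 ^ V).testBit u = true ∧ pvEntry Asub u V ≠ 0 then
          t + ((pvP Asub mn (M ^^^ 2 ^ V) u).length : Int) else t)]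
      · rw [pvFoldFlatLen (List.range mn)
          (fun u => (M ^^^ 2 ^ V).testBit u = true ∧ pvEntry Asub u V ≠ 0)
          (fun u => pvP Asub mn (M ^^^ 2 ^ V) u) (fun q => q ++ [V]) 0]
        have hPMV : pvP Asub mn M V
            = (List.range mn).flatMap (fun u =>
                if (M ^^^ 2 ^ V).testBit u = true ∧ pvEntry Asub u V ≠ 0 then
                  (pvP Asub mn (M ^^^ 2 ^ V) u).map (fun q => q ++ [V]) else []) := by
          show pvPaths Asub mn (M + 1) M V = _
          simp only [pvPaths, htb, hV0, if_true, if_false]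
          congr 1
          funext u
          rw [pvPaths_fuel Asub mn (M ^^^ 2 ^ V) M ((M ^^^ 2 ^ V) + 1) u hprevlt (by omega)]
          rfl
        rw [hPMV]
        ring
      · intro u hu t
        rw [List.mem_range] at hu
        by_cases hc : (M ^^^ 2 ^ V).testBit u = true ∧ pvEntry Asub u V ≠ 0
        · rw [if_pos hc, if_pos hc]
          congr 1
          by_cases hu0 : u = 0
          · subst hu0
            by_cases hp1 : M ^^^ 2 ^ V = 1
            · rw [hp1]
              apply (hinv _ 0).1
              exact Or.inl ⟨Nat.one_lt_two_pow (by omega), by omega, by decide, by decide,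
                Or.inr rfl, Or.inl (by rw [show pvc 1 = 1 by decide]; omega)⟩
            · rw [(hinv _ 0).2, pvP_zero_len Asub mn _ hp1]
              · simp
              · rintro (⟨c1, c2, c3, c4, c5, c6⟩ | ⟨e1, e2, e3, e4, e5⟩)
                · rcases c5 with c5 | c5
                  · exact c5 rfl
                  · exact hp1 c5
                · exact hprevne e1
          · apply (hinv _ u).1
            exact Or.inl ⟨hprev2, hu, hprev0, hc.1, Or.inl hu0, Or.inl (by omega)⟩
        · rw [if_neg hc, if_neg hc]
    rw [htot]
    by_cases hpos : ((pvP Asub mn M V).length : Int) > 0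
    · rw [if_pos hpos]
      have hold : dp.getD (M, V) 0 = 0 := by
        apply (hinv M V).2
        rintro (⟨c1, c2, c3, c4, c5, c6⟩ | ⟨e1, e2, e3, e4, e5⟩)
        · omega
        · omega
      intro mask v
      by_cases he : (mask, v) = ((M, V) : Nat × Nat)
      · rw [Prod.mk.injEq] at he
        obtain ⟨rfl, rfl⟩ := he
        constructor
        · intro _
          rw [PySem.Dict.getD_insert_self, hold]
          ring
        · intro hc
          exact absurd (Or.inr ⟨rfl, by omega, hV, htb, hV0⟩) hc
      · rw [PySem.Dict.getD_insert_of_ne _ _ _ he]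
        exact ⟨fun hc => (hinv mask v).1 ((pvCondV_succ_elim (by
            rintro ⟨rfl, rfl, -, -, -⟩
            exact he rfl)).mp hc),
          fun hc => (hinv mask v).2 (fun hc' => hc ((pvCondV_succ_elim (by
            rintro ⟨rfl, rfl, -, -, -⟩
            exact he rfl)).mpr hc'))⟩
    · rw [if_neg hpos]
      have hold : dp.getD (M, V) 0 = 0 := by
        apply (hinv M V).2
        rintro (⟨c1, c2, c3, c4, c5, c6⟩ | ⟨e1, e2, e3, e4, e5⟩)
        · omega
        · omega
      intro mask v
      by_cases he : (mask, v) = ((M, V) : Nat × Nat)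
      · rw [Prod.mk.injEq] at he
        obtain ⟨rfl, rfl⟩ := he
        constructor
        · intro _
          rw [hold]
          omega
        · intro hc
          exact absurd (Or.inr ⟨rfl, by omega, hV, htb, hV0⟩) hc
      · exact ⟨fun hc => (hinv mask v).1 ((pvCondV_succ_elim (by
            rintro ⟨rfl, rfl, -, -, -⟩
            exact he rfl)).mp hc),
          fun hc => (hinv mask v).2 (fun hc' => hc ((pvCondV_succ_elim (by
            rintro ⟨rfl, rfl, -, -, -⟩
            exact he rfl)).mpr hc'))⟩

theorem pvCond_succM_elim {mn s M mask v : Nat}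
    (h : ¬(mask = M ∧ pvc M = s ∧ M.testBit 0 = true)) :
    (pvCond mn s (M + 1) mask v ↔ pvCond mn s M mask v) := by
  unfold pvCond
  constructor
  · rintro ⟨c1, c2, c3, c4, c5, c6 | ⟨c6, c7⟩⟩
    · exact ⟨c1, c2, c3, c4, c5, Or.inl c6⟩
    · by_cases hMm : mask = M
      · subst hMm
        exact absurd ⟨rfl, c6, c3⟩ h
      · exact ⟨c1, c2, c3, c4, c5, Or.inr ⟨c6, by omega⟩⟩
  · rintro ⟨c1, c2, c3, c4, c5, c6 | ⟨c6, c7⟩⟩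
    · exact ⟨c1, c2, c3, c4, c5, Or.inl c6⟩
    · exact ⟨c1, c2, c3, c4, c5, Or.inr ⟨c6, by omega⟩⟩

theorem pvInv_congr {Asub : List (List Int)} {mn s M s' M' : Nat}
    {dp : PySem.Dict (Nat × Nat) Int}
    (h : ∀ mask v, pvCond mn s' M' mask v ↔ pvCond mn s M mask v)
    (hinv : pvInv Asub mn s M dp) : pvInv Asub mn s' M' dp := by
  intro mask v
  exact ⟨fun hc => (hinv mask v).1 ((h mask v).mp hc),
    fun hc => (hinv mask v).2 (fun hc' => hc ((h mask v).mpr hc'))⟩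

theorem pvCondV_zero_iff (mn s M mask v : Nat) :
    pvCondV mn s M 0 mask v ↔ pvCond mn s M mask v := by
  unfold pvCondV
  constructor
  · rintro (hc | ⟨-, h0, -, -, -⟩)
    · exact hc
    · omega
  · exact Or.inl

theorem pvCondV_final_iff {mn s M mask v : Nat}
    (h2 : 2 ≤ s) (hpc : pvc M = s) (hb0 : M.testBit 0 = true) (hM : M < 2 ^ mn) :
    pvCondV mn s M mn mask v ↔ pvCond mn s (M + 1) mask v := by
  constructor
  · rintro (⟨c1, c2, c3, c4, c5, c6⟩ | ⟨rfl, e2, e3, e4, e5⟩)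
    · refine ⟨c1, c2, c3, c4, c5, ?_⟩
      rcases c6 with c6 | ⟨c6, c7⟩
      · exact Or.inl c6
      · exact Or.inr ⟨c6, by omega⟩
    · exact ⟨hM, e3, hb0, e4, Or.inl e5, Or.inr ⟨hpc, by omega⟩⟩
  · rintro ⟨c1, c2, c3, c4, c5, c6 | ⟨c6, c7⟩⟩
    · exact Or.inl ⟨c1, c2, c3, c4, c5, Or.inl c6⟩
    · by_cases hMm : mask = M
      · subst hMm
        have hv0 : v ≠ 0 := by
          rcases c5 with c5 | c5
          · exact c5
          · subst c5
            have : pvc 1 = 1 := by decide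
            omega
        exact Or.inr ⟨rfl, c2, c2, c4, hv0⟩
      · exact Or.inl ⟨c1, c2, c3, c4, c5, Or.inr ⟨c6, by omega⟩⟩

theorem pvMStep_preserve (Asub : List (List Int)) (mn s M : Nat)
    (h2 : 2 ≤ s) (hs : s ≤ mn) (hM : M < 2 ^ mn)
    (dp : PySem.Dict (Nat × Nat) Int) (hinv : pvInv Asub mn s M dp) :
    pvInv Asub mn s (M + 1) (pvMStep Asub mn s dp M) := by
  unfold pvMStep
  by_cases hpc : pvc M = s
  swap
  · rw [if_pos (by exact hpc)]
    refine pvInv_congr (fun mask v => pvCond_succM_elim ?_) hinv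
    rintro ⟨-, hc, -⟩
    exact hpc hc
  by_cases hb0 : M.testBit 0 = true
  swap
  · rw [if_neg (by exact fun h => h hpc), if_pos hb0]
    refine pvInv_congr (fun mask v => pvCond_succM_elim ?_) hinv
    rintro ⟨-, -, hc⟩
    exact hb0 hc
  rw [if_neg (by exact fun h => h hpc), if_neg (by simp [hb0])]
  have h0 : pvInvV Asub mn s M 0 dp := by
    intro mask v
    exact ⟨fun hc => (hinv mask v).1 ((pvCondV_zero_iff mn s M mask v).mp hc),
      fun hc => (hinv mask v).2 (fun hc' => hc ((pvCondV_zero_iff mn s M mask v).mpr hc'))⟩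
  have hloop : ∀ K, K ≤ mn → pvInvV Asub mn s M K ((List.range K).foldl (pvVStep Asub mn s M) dp) := by
    intro K
    induction K with
    | zero => intro _; simpa using h0
    | succ K ihK =>
      intro hK
      rw [List.range_succ, List.foldl_append, List.foldl_cons, List.foldl_nil]
      exact pvVStep_preserve Asub mn s M K h2 hs hpc hb0 hM (by omega) _ (ihK (by omega))
  have hend := hloop mn (le_refl mn)
  intro mask v
  exact ⟨fun hc => (hend mask v).1 ((pvCondV_final_iff h2 hpc hb0 hM).mpr hc),
    fun hc => (hend mask v).2 (fun hc' => hc ((pvCondV_final_iff h2 hpc hb0 hM).mp hc'))⟩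

theorem pvMLoop (Asub : List (List Int)) (mn s : Nat)
    (h2 : 2 ≤ s) (hs : s ≤ mn)
    (dp : PySem.Dict (Nat × Nat) Int) (hinv : pvInv Asub mn s 0 dp) :
    ∀ N, N ≤ 2 ^ mn → pvInv Asub mn s N ((List.range N).foldl (pvMStep Asub mn s) dp) := by
  intro N
  induction N with
  | zero => intro _; simpa using hinv
  | succ N ihN =>
    intro hN
    rw [List.range_succ, List.foldl_append, List.foldl_cons, List.foldl_nil]
    exact pvMStep_preserve Asub mn s N h2 hs (by omega) _ (ihN (by omega))

theorem pvRound_shift (Asub : List (List Int)) (mn s : Nat)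
    (dp : PySem.Dict (Nat × Nat) Int) (hinv : pvInv Asub mn s (2 ^ mn) dp) :
    pvInv Asub mn (s + 1) 0 dp := by
  refine pvInv_congr (fun mask v => ?_) hinv
  unfold pvCond
  constructor
  · rintro ⟨c1, c2, c3, c4, c5, c6 | ⟨c6, c7⟩⟩
    · rcases Nat.lt_or_ge (pvc mask) s with h | h
      · exact ⟨c1, c2, c3, c4, c5, Or.inl h⟩
      · exact ⟨c1, c2, c3, c4, c5, Or.inr ⟨by omega, c1⟩⟩
    · omega
  · rintro ⟨c1, c2, c3, c4, c5, c6 | ⟨c6, c7⟩⟩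
    · exact ⟨c1, c2, c3, c4, c5, Or.inl (by omega)⟩
    · exact ⟨c1, c2, c3, c4, c5, Or.inl (by omega)⟩

theorem pvDP_final (Asub : List (List Int)) (mn : Nat) (h3 : 3 ≤ mn) :
    pvInv Asub mn (mn + 1) 0 (pvDP Asub mn) := by
  unfold pvDP
  have hstep : ∀ k, k ≤ mn - 1 →
      pvInv Asub mn (2 + k) 0 ((List.range' 2 k).foldl
        (fun dp ms => (List.range (2 ^ mn)).foldl (pvMStep Asub mn ms) dp)
        (PySem.Dict.empty.insert (1, 0) 1)) := by
    intro k
    induction k with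
    | zero =>
      intro _
      rw [show List.range' 2 0 = ([] : List Nat) from rfl, List.foldl_nil]
      exact pvInv_init Asub mn h3
    | succ k ihk =>
      intro hk
      rw [List.range'_concat, List.foldl_append, List.foldl_cons, List.foldl_nil]
      simp only [one_mul]
      have hmid := pvMLoop Asub mn (2 + k) (by omega) (by omega) _ (ihk (by omega)) (2 ^ mn) (le_refl _)
      have hsh := pvRound_shift Asub mn (2 + k) _ hmid
      rw [show 2 + (k + 1) = 2 + k + 1 by omega]
      exact hsh
  have := hstep (mn - 1) (le_refl _)
  rw [show 2 + (mn - 1) = mn + 1 by omega] at this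
  exact this

-- ---------- permutations lemmas ----------

theorem pvPermsNodup : ∀ (r : Nat) (xs : List Nat), xs.Nodup →
    (PySem.List.permutations xs r).Nodup := by
  intro r
  induction r with
  | zero => intro xs _; rw [PySem.List.permutations_zero]; simp
  | succ r ihr =>
    intro xs h
    rw [PySem.List.permutations_succ]
    rw [List.nodup_flatMap]
    constructor
    · intro i hi
      rw [List.mem_range] at hi
      rw [List.getElem?_eq_getElem hi]
      exact List.Nodup.map (fun a b hab => by simpa using hab)
        (ihr (xs.eraseIdx i) (h.eraseIdx i))
    · apply List.Pairwise.imp ?_ (List.nodup_range)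
      intro i j hij p hp₁ hp₂
      simp only at hp₁ hp₂
      by_cases hi : i < xs.length
      swap
      · rw [List.getElem?_eq_none (by omega)] at hp₁
        simp at hp₁
      by_cases hj : j < xs.length
      swap
      · rw [List.getElem?_eq_none (by omega)] at hp₂
        simp at hp₂
      rw [List.getElem?_eq_getElem hi] at hp₁
      rw [List.getElem?_eq_getElem hj] at hp₂
      rw [List.mem_map] at hp₁ hp₂
      obtain ⟨p₁, -, hpe₁⟩ := hp₁
      obtain ⟨p₂, -, hpe₂⟩ := hp₂
      have hcc := hpe₁.trans hpe₂.symm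
      injection hcc with h1 h2
      exact hij (h.getElem_inj_iff.mp h1)

theorem pvMemPermsFull : ∀ (n : Nat) (xs p : List Nat), xs.length = n → xs.Nodup → p.Perm xs →
    p ∈ PySem.List.permutations xs xs.length := by
  intro n
  induction n with
  | zero =>
    intro xs p hlen _ hp
    rw [List.length_eq_zero_iff] at hlen
    subst hlen
    have := hp.eq_nil
    subst this
    simp [PySem.List.permutations_zero]
  | succ n ihn =>
    intro xs p hlen hnd hp
    cases p with
    | nil =>
      have := hp.length_eq
      simp at this
      omega
    | cons a t =>
      have ha : a ∈ xs := hp.mem_iff.mp (by simp)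
      obtain ⟨i, hi, hia⟩ := List.getElem_of_mem ha
      rw [hlen, PySem.List.permutations_succ, List.mem_flatMap]
      refine ⟨i, by rw [List.mem_range]; omega, ?_⟩
      rw [List.getElem?_eq_getElem hi, hia]
      simp only [List.mem_map]
      refine ⟨t, ?_, rfl⟩
      have ht : t.Perm (xs.eraseIdx i) := by
        have h2 := (List.cons_perm_iff_perm_erase.mp hp).2
        rw [← hia, List.Nodup.erase_getElem hnd i hi] at h2
        exact h2
      have hlen' : (xs.eraseIdx i).length = n := by
        rw [List.length_eraseIdx_of_lt hi]
        omega
      have := ihn (xs.eraseIdx i) t hlen' (hnd.eraseIdx i) ht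
      rw [hlen'] at this
      exact this

theorem pvZipAll (f : Nat → Nat → Bool) :
    ∀ l : List Nat, ((l.zip l.tail).all (fun uv => f uv.1 uv.2) = true)
      ↔ List.IsChain (fun a b => f a b = true) l := by
  intro l
  induction l with
  | nil => simp
  | cons a t iht =>
    cases t with
    | nil => simp
    | cons b t' =>
      rw [List.isChain_cons]
      simp only [List.tail_cons] at iht
      simp only [List.tail_cons, List.zip_cons_cons, List.all_cons, Bool.and_eq_true]
      rw [iht]
      simp

-- ---------- the core equivalence of the two cycle counters ----------

theorem pvChainIff (Asub : List (List Int)) (q : List Nat) :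
    List.IsChain (fun a b => (pvEntry Asub a b != 0) = true) q
      ↔ List.IsChain (fun a b => pvEntry Asub a b ≠ 0) q := by
  constructor
  · exact fun h => h.imp (fun {a b} hab => bne_iff_ne.mp hab)
  · exact fun h => h.imp (fun {a b} hab => bne_iff_ne.mpr hab)

theorem pvCountHam_eq (Asub : List (List Int)) (m : Int) :
    count_ham_cycles_sub Asub m = pvCountHamAlt Asub m := by
  by_cases hm : m < 3
  · unfold count_ham_cycles_sub pvCountHamAlt
    rw [if_pos hm, if_pos hm]
  rw [count_ham_eq_pvDP, if_neg hm]
  unfold pvCountHamAlt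
  rw [if_neg hm]
  have h3 : 3 ≤ m.toNat := by omega
  set mn := m.toNat with hmn
  set full := 2 ^ mn - 1 with hfull
  set verts := List.range' 1 (mn - 1) with hverts
  have hfin := pvDP_final Asub mn h3
  have hfulllt : full < 2 ^ mn := by
    have : (1 : Nat) ≤ 2 ^ mn := Nat.one_le_two_pow
    omega
  have hfullbit : ∀ x, full.testBit x = decide (x < mn) := by
    intro x
    rw [hfull, Nat.testBit_two_pow_sub_one]
  -- A-side: the final sum counts all good paths, grouped by last vertex
  have hA : (List.range' 1 (mn - 1)).foldl (fun c u =>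
      if pvEntry Asub u 0 ≠ 0 then c + (pvDP Asub mn).getD (full, u) 0 else c) 0
      = ((verts.flatMap (fun u =>
          if pvEntry Asub u 0 ≠ 0 then pvP Asub mn full u else [])).length : Int) := by
    rw [PySem.List.foldl_congr_mem'
      (g := fun c u => if pvEntry Asub u 0 ≠ 0 then c + ((pvP Asub mn full u).length : Int) else c)]
    · rw [pvFoldFlatLen verts (fun u => pvEntry Asub u 0 ≠ 0) (fun u => pvP Asub mn full u) id 0]
      rw [show (verts.flatMap (fun u =>
          if pvEntry Asub u 0 ≠ 0 then (pvP Asub mn full u).map id else []))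
        = verts.flatMap (fun u =>
          if pvEntry Asub u 0 ≠ 0 then pvP Asub mn full u else []) by
        congr 1
        funext u
        split <;> simp]
      ring
    · intro u hu c
      rw [List.mem_range'_1] at hu
      by_cases hc : pvEntry Asub u 0 ≠ 0
      · rw [if_pos hc, if_pos hc]
        congr 1
        apply (hfin full u).1
        refine ⟨hfulllt, by omega, ?_, ?_, Or.inl (by omega), Or.inl ?_⟩
        · rw [hfullbit 0]
          simp
          omega
        · rw [hfullbit u]
          simp
          omega
        · rw [hfull, pvc_full]
          omega
      · rw [if_neg hc, if_neg hc]
  rw [hA]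
  -- B-side: the loop counts the filtered permutations
  rw [PySem.List.foldl_if_add_one]
  rw [List.countP_eq_length_filter]
  -- the two lists are permutations of each other
  set pb : List Nat → Bool := fun p =>
    (((0 :: p).zip (0 :: p).tail).all (fun uv => pvEntry Asub uv.1 uv.2 != 0)) &&
      (pvEntry Asub ((0 :: p).getLastD 0) 0 != 0) with hpb
  have hvnodup : verts.Nodup := List.nodup_range' 1
  have hL : List.Perm
      (((PySem.List.permutations verts verts.length).filter pb).map (fun p => 0 :: p))
      (verts.flatMap (fun u => if pvEntry Asub u 0 ≠ 0 then pvP Asub mn full u else [])) := by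
    apply (List.perm_ext_iff_of_nodup ?_ ?_).mpr
    · intro q
      rw [List.mem_map, List.mem_flatMap]
      constructor
      · rintro ⟨p, hpmem, rfl⟩
        rw [List.mem_filter] at hpmem
        obtain ⟨hperm0, hpbtrue⟩ := hpmem
        have hperm : p.Perm verts := PySem.List.perm_of_mem_permutations hperm0
        rw [hpb] at hpbtrue
        simp only [Bool.and_eq_true] at hpbtrue
        obtain ⟨hchain0, hlast0⟩ := hpbtrue
        have hchain := (pvChainIff Asub (0 :: p)).mp ((pvZipAll _ (0 :: p)).mp hchain0)
        have hpne : p ≠ [] := by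
          intro h0
          have := hperm.length_eq
          rw [h0, hverts] at this
          simp at this
          omega
        obtain ⟨b, t, rfl⟩ : ∃ b t, p = b :: t := by
          cases p with
          | nil => exact absurd rfl hpne
          | cons b t => exact ⟨b, t, rfl⟩
        obtain ⟨u, hu⟩ : ∃ u, (b :: t).getLast? = some u := ⟨(b :: t).getLast (by simp), List.getLast?_eq_some_getLast (by simp)⟩
        have humem : u ∈ b :: t := List.mem_of_getLast? hu
        have huverts : u ∈ verts := hperm.mem_iff.mp humem
        have hubd : 1 ≤ u ∧ u < mn := by
          rw [hverts, List.mem_range'_1] at huverts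
          omega
        have hqlast : (0 :: b :: t).getLast? = some u := by
          rw [List.getLast?_cons_cons]
          exact hu
        have hadj : pvEntry Asub u 0 ≠ 0 := by
          rw [List.getLastD_eq_getLast?, hqlast] at hlast0
          exact bne_iff_ne.mp hlast0
        refine ⟨u, huverts, ?_⟩
        rw [if_pos hadj]
        rw [show pvP Asub mn full u = pvPaths Asub mn (full + 1) full u from rfl]
        rw [pvPaths_mem Asub mn full (full + 1) u (0 :: b :: t) (by omega) hfulllt]
        have hp0 : (0 : Nat) ∉ b :: t := by
          intro h0
          have := hperm.mem_iff.mp h0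
          rw [hverts, List.mem_range'_1] at this
          omega
        refine ⟨rfl, hqlast, ?_, ?_, hchain⟩
        · exact List.nodup_cons.mpr ⟨hp0, hperm.nodup_iff.mpr hvnodup⟩
        · intro x
          rw [hfullbit x]
          constructor
          · intro hx
            rcases List.mem_cons.mp hx with rfl | hx
            · simp
              omega
            · have := hperm.mem_iff.mp hx
              rw [hverts, List.mem_range'_1] at this
              simp
              omega
          · intro hx
            simp at hx
            by_cases hx0 : x = 0
            · exact List.mem_cons.mpr (Or.inl hx0)
            · refine List.mem_cons.mpr (Or.inr (hperm.mem_iff.mpr ?_))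
              rw [hverts, List.mem_range'_1]
              omega
      · rintro ⟨u, huverts, hq⟩
        by_cases hadj : pvEntry Asub u 0 ≠ 0
        swap
        · rw [if_neg hadj] at hq
          simp at hq
        rw [if_pos hadj] at hq
        rw [show pvP Asub mn full u = pvPaths Asub mn (full + 1) full u from rfl] at hq
        rw [pvPaths_mem Asub mn full (full + 1) u q (by omega) hfulllt] at hq
        obtain ⟨g1, g2, g3, g4, g5⟩ := hq
        obtain ⟨p, rfl⟩ : ∃ p, q = 0 :: p := by
          cases q with
          | nil => simp at g1
          | cons a t =>
            simp at g1
            exact ⟨t, by rw [g1]⟩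
        have hbd : 1 ≤ u ∧ u < mn := by
          rw [hverts, List.mem_range'_1] at huverts
          omega
        have h0p : (0 : Nat) ∉ p := by
          intro h0
          rw [List.nodup_cons] at g3
          exact g3.1 h0
        have hperm : p.Perm verts := by
          apply (List.perm_ext_iff_of_nodup (List.nodup_cons.mp g3).2 hvnodup).mpr
          intro x
          rw [hverts, List.mem_range'_1]
          constructor
          · intro hx
            have hxq := (g4 x).mp (List.mem_cons_of_mem 0 hx)
            rw [hfullbit x] at hxq
            simp at hxq
            have : x ≠ 0 := fun h0 => h0p (h0 ▸ hx)
            omega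
          · intro hx
            have : x ∈ 0 :: p := by
              apply (g4 x).mpr
              rw [hfullbit x]
              simp
              omega
            rcases List.mem_cons.mp this with rfl | hxp
            · omega
            · exact hxp
        refine ⟨p, ?_, rfl⟩
        rw [List.mem_filter]
        constructor
        · exact pvMemPermsFull verts.length verts p rfl hvnodup hperm
        · rw [hpb]
          simp only [Bool.and_eq_true]
          constructor
          · exact (pvZipAll _ (0 :: p)).mpr ((pvChainIff Asub (0 :: p)).mpr g5)
          · rw [List.getLastD_eq_getLast?, g2]
            exact bne_iff_ne.mpr hadj
    · apply List.Nodup.map (fun a b hab => by simpa using hab)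
      exact (pvPermsNodup verts.length verts hvnodup).filter pb
    · rw [List.nodup_flatMap]
      constructor
      · intro u _
        split
        · exact pvPaths_nodup Asub mn full (full + 1) u (by omega) hfulllt
        · simp
      · apply List.Pairwise.imp ?_ hvnodup
        intro u₁ u₂ hne q hq₁ hq₂
        simp only at hq₁ hq₂
        by_cases h₁ : pvEntry Asub u₁ 0 ≠ 0
        swap
        · rw [if_neg h₁] at hq₁; simp at hq₁
        by_cases h₂ : pvEntry Asub u₂ 0 ≠ 0
        swap
        · rw [if_neg h₂] at hq₂; simp at hq₂
        rw [if_pos h₁] at hq₁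
        rw [if_pos h₂] at hq₂
        rw [show pvP Asub mn full u₁ = pvPaths Asub mn (full + 1) full u₁ from rfl] at hq₁
        rw [show pvP Asub mn full u₂ = pvPaths Asub mn (full + 1) full u₂ from rfl] at hq₂
        rw [pvPaths_mem Asub mn full (full + 1) u₁ q (by omega) hfulllt] at hq₁
        rw [pvPaths_mem Asub mn full (full + 1) u₂ q (by omega) hfulllt] at hq₂
        have e₁ := hq₁.2.1
        have e₂ := hq₂.2.1
        rw [e₁] at e₂
        simp at e₂
        exact hne e₂
  have hlen := hL.length_eq
  rw [List.length_map] at hlen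
  rw [← hlen]
  ring

-- ---------- outer-structure lemmas ----------

theorem pvMap5 {α β : Type} (l : List α) (h : l.length = 5) (d : α) (f : α → β) :
    (List.range 5).map (fun i => f (l.getD i d)) = l.map f := by
  rcases l with _ | ⟨a, _ | ⟨b, _ | ⟨c, _ | ⟨d1, _ | ⟨e, _ | ⟨f1, t⟩⟩⟩⟩⟩⟩ <;>
    first
      | rfl
      | (exfalso; simp at h)

theorem pvCycles3_eq (A : List (List Int)) :
    (PySem.List.combinations (List.range A.length) 3).foldl (fun acc t =>
      if pvEntry A (t.getD 0 0) (t.getD 1 0) ≠ 0 ∧ pvEntry A (t.getD 1 0) (t.getD 2 0) ≠ 0 ∧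
          pvEntry A (t.getD 2 0) (t.getD 0 0) ≠ 0 then
        acc ++ [PySem.Set.ofList (t.map (fun x => (x : Int)))]
      else if pvEntry A (t.getD 0 0) (t.getD 2 0) ≠ 0 ∧ pvEntry A (t.getD 2 0) (t.getD 1 0) ≠ 0 ∧
          pvEntry A (t.getD 1 0) (t.getD 0 0) ≠ 0 then
        acc ++ [PySem.Set.ofList (t.map (fun x => (x : Int)))]
      else acc) []
    = ((PySem.List.combinations (List.range A.length) 3).filter (fun t =>
        ((pvEntry A (t.getD 0 0) (t.getD 1 0) != 0) && (pvEntry A (t.getD 1 0) (t.getD 2 0) != 0) &&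
          (pvEntry A (t.getD 2 0) (t.getD 0 0) != 0)) ||
        ((pvEntry A (t.getD 0 0) (t.getD 2 0) != 0) && (pvEntry A (t.getD 2 0) (t.getD 1 0) != 0) &&
          (pvEntry A (t.getD 1 0) (t.getD 0 0) != 0)))).map
          (fun t => PySem.Set.ofList (t.map (fun x => (x : Int)))) := by
  have hb : ∀ (acc : List (List Int)) (t : List Nat),
      (if pvEntry A (t.getD 0 0) (t.getD 1 0) ≠ 0 ∧ pvEntry A (t.getD 1 0) (t.getD 2 0) ≠ 0 ∧
          pvEntry A (t.getD 2 0) (t.getD 0 0) ≠ 0 then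
        acc ++ [PySem.Set.ofList (t.map (fun x => (x : Int)))]
      else if pvEntry A (t.getD 0 0) (t.getD 2 0) ≠ 0 ∧ pvEntry A (t.getD 2 0) (t.getD 1 0) ≠ 0 ∧
          pvEntry A (t.getD 1 0) (t.getD 0 0) ≠ 0 then
        acc ++ [PySem.Set.ofList (t.map (fun x => (x : Int)))]
      else acc)
      = (if (((pvEntry A (t.getD 0 0) (t.getD 1 0) != 0) && (pvEntry A (t.getD 1 0) (t.getD 2 0) != 0) &&
          (pvEntry A (t.getD 2 0) (t.getD 0 0) != 0)) ||
        ((pvEntry A (t.getD 0 0) (t.getD 2 0) != 0) && (pvEntry A (t.getD 2 0) (t.getD 1 0) != 0) &&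
          (pvEntry A (t.getD 1 0) (t.getD 0 0) != 0))) = true then
        acc ++ [PySem.Set.ofList (t.map (fun x => (x : Int)))] else acc) := by
    intro acc t
    have hpb : (((pvEntry A (t.getD 0 0) (t.getD 1 0) != 0) && (pvEntry A (t.getD 1 0) (t.getD 2 0) != 0) &&
          (pvEntry A (t.getD 2 0) (t.getD 0 0) != 0)) ||
        ((pvEntry A (t.getD 0 0) (t.getD 2 0) != 0) && (pvEntry A (t.getD 2 0) (t.getD 1 0) != 0) &&
          (pvEntry A (t.getD 1 0) (t.getD 0 0) != 0))) = true
        ↔ ((pvEntry A (t.getD 0 0) (t.getD 1 0) ≠ 0 ∧ pvEntry A (t.getD 1 0) (t.getD 2 0) ≠ 0 ∧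
          pvEntry A (t.getD 2 0) (t.getD 0 0) ≠ 0) ∨
          (pvEntry A (t.getD 0 0) (t.getD 2 0) ≠ 0 ∧ pvEntry A (t.getD 2 0) (t.getD 1 0) ≠ 0 ∧
          pvEntry A (t.getD 1 0) (t.getD 0 0) ≠ 0)) := by
      simp [Bool.or_eq_true, Bool.and_eq_true, bne_iff_ne, and_assoc]
    by_cases h1 : pvEntry A (t.getD 0 0) (t.getD 1 0) ≠ 0 ∧ pvEntry A (t.getD 1 0) (t.getD 2 0) ≠ 0 ∧
        pvEntry A (t.getD 2 0) (t.getD 0 0) ≠ 0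
    · rw [if_pos h1, if_pos (hpb.mpr (Or.inl h1))]
    · rw [if_neg h1]
      by_cases h2 : pvEntry A (t.getD 0 0) (t.getD 2 0) ≠ 0 ∧ pvEntry A (t.getD 2 0) (t.getD 1 0) ≠ 0 ∧
          pvEntry A (t.getD 1 0) (t.getD 0 0) ≠ 0
      · rw [if_pos h2, if_pos (hpb.mpr (Or.inr h2))]
      · rw [if_neg h2, if_neg (fun hc => (hpb.mp hc).elim h1 h2)]
  simp only [hb]
  rw [PySem.List.foldl_append_if]
  simp

theorem pvDropFold {α : Type} (l : List α) (d : α) (g : Int → α → Int) :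
    ∀ k init, (List.range' (k) (l.length - k)).foldl (fun a j => g a (l.getD j d)) init
      = (l.drop k).foldl g init := by
  suffices hsuf : ∀ n k init, l.length - k = n →
      (List.range' (k) (l.length - k)).foldl (fun a j => g a (l.getD j d)) init
        = (l.drop k).foldl g init by
    intro k init
    exact hsuf _ k init rfl
  intro n
  induction n with
  | zero =>
    intro k init hk
    rw [hk, List.drop_eq_nil_of_le (by omega)]
    rfl
  | succ n ihn =>
    intro k init hk
    have hklt : k < l.length := by omega
    rw [hk, List.range'_succ, List.foldl_cons,
      List.drop_eq_getElem_cons hklt, List.foldl_cons,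
      List.getD_eq_getElem l d hklt]
    have := ihn (k + 1) (g init l[k]) (by omega)
    rw [show l.length - (k + 1) = n by omega] at this
    exact this

theorem pvPairSum (q : List Int → List Int → Bool) :
    ∀ (l : List (List Int)) (init : Int),
      (List.range l.length).foldl (fun a i =>
        (l.drop (i + 1)).foldl (fun a y => if q (l.getD i []) y then a + 1 else a) a) init
      = init + ((PySem.List.combinations l 2).countP
          (fun pr => q (pr.getD 0 []) (pr.getD 1 [])) : Int) := by
  intro l
  induction l with
  | nil =>
    intro init
    simp [PySem.List.combinations_nil_succ]
  | cons x xs ihl =>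
    intro init
    rw [List.length_cons, List.range_succ_eq_map, List.foldl_cons, List.foldl_map]
    simp only [Nat.succ_eq_add_one, List.drop_succ_cons, List.getD_cons_succ,
      List.getD_cons_zero, List.drop_zero]
    rw [ihl]
    rw [PySem.List.foldl_if_add_one (fun y => q x y)]
    rw [PySem.List.combinations_cons_succ, List.countP_append, List.countP_map,
      PySem.List.combinations_one, List.countP_map]
    have hcomp : (((fun pr => q (pr.getD 0 []) (pr.getD 1 [])) ∘ fun c => x :: c) ∘ fun y => [y])
        = fun y => q x y := funext fun y => rfl
    rw [hcomp, show (1 + 1 : Nat) = 2 from rfl]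
    push_cast
    ring

theorem pvA2_eq (l : List (List Int)) (q : List Int → List Int → Bool) :
    (List.range l.length).foldl (fun a i =>
        (List.range' (i + 1) (l.length - (i + 1))).foldl (fun a j =>
          if q (l.getD i []) (l.getD j []) = true then a + 1 else a) a) (0 : Int)
      = ((PySem.List.combinations l 2).countP (fun pr => q (pr.getD 0 []) (pr.getD 1 [])) : Int) := by
  have hdrop : ∀ (i : Nat) (a : Int),
      (List.range' (i + 1) (l.length - (i + 1))).foldl (fun a j =>
          if q (l.getD i []) (l.getD j []) = true then a + 1 else a) a
        = (l.drop (i + 1)).foldl (fun a y => if q (l.getD i []) y then a + 1 else a) a := by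
    intro i a
    exact pvDropFold l [] (fun a y => if q (l.getD i []) y then a + 1 else a) (i + 1) a
  simp only [hdrop]
  rw [pvPairSum q l 0]
  ring

theorem pvDisjoint_eq (s t : List Int) :
    PySem.Set.isdisjoint s t = (PySem.Set.inter s t == ([] : List Int)) := by
  rw [Bool.eq_iff_iff, PySem.Set.isdisjoint_iff, beq_iff_eq, List.eq_nil_iff_forall_not_mem]
  constructor
  · intro h x hx
    rw [PySem.Set.mem_inter] at hx
    exact h x hx.1 hx.2
  · intro h x hxs hxt
    exact h x ((PySem.Set.mem_inter s t x).mpr ⟨hxs, hxt⟩)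


-- ===== VERDICT (by name: the statement is the Claim_ definition above) =====
theorem get_cycle_data_spec : Claim_equal_get_cycle_data := by
  intro A _ _
  show get_cycle_data A = get_cycle_data_alt A
  unfold get_cycle_data get_cycle_data_alt
  dsimp only
  rw [pvCycles3_eq A]
  simp only [pvCountHam_eq]
  have h5 : ∀ t ∈ PySem.List.combinations (List.range A.length) 5, ∀ c : Int,
      c + pvCountHamAlt ((List.range 5).map (fun i =>
        (List.range 5).map (fun j => pvEntry A (t.getD i 0) (t.getD j 0)))) 5
        = c + pvCountHamAlt (t.map (fun p => t.map (fun q => pvEntry A p q))) 5 := by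
    intro t ht c
    have hlen := PySem.List.length_of_mem_combinations ht
    have h1 : ∀ i : Nat, (List.range 5).map (fun j => pvEntry A (t.getD i 0) (t.getD j 0))
        = t.map (fun q => pvEntry A (t.getD i 0) q) := fun i => pvMap5 t hlen 0 _
    have h2 : (List.range 5).map (fun i =>
        (List.range 5).map (fun j => pvEntry A (t.getD i 0) (t.getD j 0)))
        = t.map (fun p => t.map (fun q => pvEntry A p q)) := by
      simp only [h1]
      exact pvMap5 t hlen 0 (fun p => t.map (fun q => pvEntry A p q))
    rw [h2]
  rw [PySem.List.foldl_congr_mem' (PySem.List.combinations (List.range A.length) 5)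
    (fun (c : Int) (t : List Nat) => c + pvCountHamAlt ((List.range 5).map (fun i =>
      (List.range 5).map (fun j => pvEntry A (t.getD i 0) (t.getD j 0)))) 5)
    (fun (c : Int) (t : List Nat) => c + pvCountHamAlt (t.map (fun p =>
      t.map (fun q => pvEntry A p q))) 5) 0 h5]
  rw [PySem.List.foldl_add]
  rw [pvA2_eq _ (fun s t => PySem.Set.isdisjoint s t)]
  have hcp : ∀ (l : List (List Int)),
      List.countP (fun pr => PySem.Set.isdisjoint (pr.getD 0 []) (pr.getD 1 []))
        (PySem.List.combinations l 2)
      = List.countP (fun pr => PySem.Set.inter (pr.getD 0 []) (pr.getD 1 []) == ([] : List Int))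
        (PySem.List.combinations l 2) :=
    fun l => List.countP_congr (fun pr _ => by rw [pvDisjoint_eq])
  simp only [hcp]
  simp
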